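-- pv_equiv track=rewrite | github.com/thejuliekramer/ckanext-datajson | ckanext/datajson/build_datajson.py | get_best_resource
-- ===== SOURCE A (Python) =====
-- def get_best_resource(package, acceptable_formats, unacceptable_formats=None):
--     resources = list(r for r in package["resources"] if r["format"].lower() in acceptable_formats)
--     if len(resources) == 0:
--         if unacceptable_formats:
--             # try at least any resource that's not unacceptable
--             resources = list(r for r in package["resources"] if r["format"].lower() not in unacceptable_formats)
--         if len(resources) == 0:
--             # there is no acceptable resource to show
--             return {}
--     else:
--         resources.sort(key=lambda r: acceptable_formats.index(r["format"].lower()))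
--     return resources[0]
-- ===== SOURCE B (Python) =====
-- def get_best_resource(package, acceptable_formats, unacceptable_formats=None):
--     resources = package["resources"]
--     for fmt in acceptable_formats:
--         for r in resources:
--             if r["format"].lower() == fmt:
--                 return r
--     if unacceptable_formats:
--         for r in resources:
--             if r["format"].lower() not in unacceptable_formats:
--                 return r
--     return {}
-- ===== Notes on version B (the rewrite author's own statement) =====
-- stated objective: idiomatic
-- what changed: Replaces filter-into-list plus stable sort by acceptable_formats.index with a priority-ordered nested scan: for each acceptable format in order, return the first resource (in original order) with that format, then one fallback scan for a not-unacceptable resource.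
import Mathlib
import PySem

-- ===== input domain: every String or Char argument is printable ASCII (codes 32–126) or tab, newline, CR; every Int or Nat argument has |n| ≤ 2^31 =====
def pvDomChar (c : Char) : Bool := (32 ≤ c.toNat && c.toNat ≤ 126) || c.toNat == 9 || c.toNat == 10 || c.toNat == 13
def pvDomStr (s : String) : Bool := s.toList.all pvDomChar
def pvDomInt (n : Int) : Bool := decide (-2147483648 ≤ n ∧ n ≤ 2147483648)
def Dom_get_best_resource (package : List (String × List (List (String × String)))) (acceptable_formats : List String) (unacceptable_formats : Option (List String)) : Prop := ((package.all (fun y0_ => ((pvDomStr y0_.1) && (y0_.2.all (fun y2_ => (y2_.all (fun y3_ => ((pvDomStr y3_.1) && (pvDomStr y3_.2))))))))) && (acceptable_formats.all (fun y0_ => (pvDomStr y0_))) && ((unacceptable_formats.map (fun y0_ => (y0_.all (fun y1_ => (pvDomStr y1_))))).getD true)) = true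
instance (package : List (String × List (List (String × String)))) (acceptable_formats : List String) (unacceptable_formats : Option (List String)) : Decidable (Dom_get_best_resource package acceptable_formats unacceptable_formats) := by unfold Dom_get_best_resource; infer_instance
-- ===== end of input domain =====

-- ===== PORT A =====
-- B replaces A's filter-then-stable-sort with a priority-ordered nested scan; same return value, proved below.
-- dict lookup r["format"] / package["resources"]: first match in the association list; the `.getD` defaults are
-- unreachable under Pre_get_best_resource (Python raises KeyError exactly there).
def pvLowFmt (r : List (String × String)) : String :=
  PySem.Str.lower (((r.find? (fun kv => kv.1 == "format")).map (·.2)).getD "")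

def pvResources (package : List (String × List (List (String × String)))) : List (List (String × String)) :=
  ((package.find? (fun kv => kv.1 == "resources")).map (·.2)).getD []

def get_best_resource (package : List (String × List (List (String × String)))) (acceptable_formats : List String) (unacceptable_formats : Option (List String)) : List (String × String) :=
  let rsAll := pvResources package
  let resources := rsAll.filter (fun r => acceptable_formats.contains (pvLowFmt r))
  if resources.length = 0 then
    let resources2 :=
      if (match unacceptable_formats with | some l => !l.isEmpty | none => false) then
        rsAll.filter (fun r => !(unacceptable_formats.getD []).contains (pvLowFmt r))
      else resources
    if resources2.length = 0 then []
    else (PySem.List.pyGet? resources2 0).getD []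
  else
    (PySem.List.pyGet? (PySem.List.sorted resources (fun r => ((PySem.List.index? acceptable_formats (pvLowFmt r)).getD 0 : Nat))) 0).getD []

-- ===== PORT B =====
-- outer loop of Source B over acceptable_formats; the inner `for r in resources: if … == fmt: return r` is find?
def pvScan (resources : List (List (String × String))) : List String → Option (List (String × String))
  | [] => none
  | f :: rest =>
    match resources.find? (fun r => pvLowFmt r == f) with
    | some r => some r
    | none => pvScan resources rest

def get_best_resource_alt (package : List (String × List (List (String × String)))) (acceptable_formats : List String) (unacceptable_formats : Option (List String)) : List (String × String) :=
  let resources := pvResources package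
  match pvScan resources acceptable_formats with
  | some r => r
  | none =>
    if (match unacceptable_formats with | some l => !l.isEmpty | none => false) then
      match resources.find? (fun r => !(unacceptable_formats.getD []).contains (pvLowFmt r)) with
      | some r => r
      | none => []
    else []

-- ===== PRECONDITION & SPEC =====
-- Pre_ excludes exactly the inputs on which the Python A raises KeyError: a package without a
-- "resources" key, or a listed resource without a "format" key.
def Pre_get_best_resource (package : List (String × List (List (String × String)))) (acceptable_formats : List String) (unacceptable_formats : Option (List String)) : Prop :=
  (package.find? (fun kv => kv.1 == "resources")).isSome = true ∧
  ∀ r ∈ pvResources package, (r.find? (fun kv => kv.1 == "format")).isSome = true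
instance (package : List (String × List (List (String × String)))) (acceptable_formats : List String) (unacceptable_formats : Option (List String)) : Decidable (Pre_get_best_resource package acceptable_formats unacceptable_formats) := by unfold Pre_get_best_resource; infer_instance
def pvWitness_get_best_resource : (List (String × List (List (String × String)))) × List String × Option (List String) :=
  ([("resources", [[("format", "CSV")], [("format", "json")]])], ["json", "csv"], some ["xml"])

def Spec_get_best_resource (package : List (String × List (List (String × String)))) (acceptable_formats : List String) (unacceptable_formats : Option (List String)) (out : List (String × String)) : Prop := out = get_best_resource_alt package acceptable_formats unacceptable_formats
instance (package : List (String × List (List (String × String)))) (acceptable_formats : List String) (unacceptable_formats : Option (List String)) (out : List (String × String)) : Decidable (Spec_get_best_resource package acceptable_formats unacceptable_formats out) := by unfold Spec_get_best_resource; infer_instance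

-- ===== CLAIM (what is proved, stated in full; the proofs are below) =====
def Claim_equal_get_best_resource : Prop := ∀ (package : List (String × List (List (String × String)))) (acceptable_formats : List String) (unacceptable_formats : Option (List String)), Dom_get_best_resource package acceptable_formats unacceptable_formats → Pre_get_best_resource package acceptable_formats unacceptable_formats → Spec_get_best_resource package acceptable_formats unacceptable_formats (get_best_resource package acceptable_formats unacceptable_formats)

-- ===== LEMMAS AND PROOFS =====

-- running first-minimum step, the accumulator form of PySem.List.min?
def pvMinAux {A : Type} (key : A → Nat) (m : A) (l : List A) : Option A :=
  l.foldl (fun acc x => match acc with | none => some x | some m => if key x < key m then some x else some m) (some m)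

theorem pvMinAux_cons {A : Type} (key : A → Nat) (m x : A) (l : List A) :
    pvMinAux key m (x :: l) = pvMinAux key (if key x < key m then x else m) l := by
  simp [pvMinAux, List.foldl]; split <;> simp

theorem min?_cons {A : Type} (key : A → Nat) (x : A) (l : List A) :
    PySem.List.min? (x :: l) key = pvMinAux key x l := rfl

-- keep: the start already minimal stays
theorem pvMinAux_keep {A : Type} (key : A → Nat) (l : List A) :
    ∀ m : A, (∀ y ∈ l, ¬ key y < key m) → pvMinAux key m l = some m := by
  induction l with
  | nil => intro m _; rfl
  | cons x t ih =>
    intro m h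
    rw [pvMinAux_cons]
    have hx : ¬ key x < key m := h x (by simp)
    rw [if_neg hx]
    exact ih m (fun y hy => h y (by simp [hy]))

-- a strict improvement below both start thresholds gives the same result
theorem pvMinAux_lt {A : Type} (key : A → Nat) (l : List A) :
    ∀ x n : A, pvMinAux key x l = some n → key n < key x →
      ∀ m : A, key n < key m → pvMinAux key m l = some n := by
  induction l with
  | nil =>
    intro x n h hlt m _
    simp [pvMinAux] at h; subst h; omega
  | cons y t ih =>
    intro x n h hlt m hm
    rw [pvMinAux_cons] at h
    rw [pvMinAux_cons]
    by_cases hyx : key y < key x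
    · rw [if_pos hyx] at h
      by_cases hym : key y < key m
      · rw [if_pos hym]; exact h
      · rw [if_neg hym]
        exact ih y n h (by omega) m hm
    · rw [if_neg hyx] at h
      by_cases hym : key y < key m
      · rw [if_pos hym]
        exact ih x n h hlt y (by omega)
      · rw [if_neg hym]
        exact ih x n h hlt m hm

theorem pvMinAux_improve {A : Type} (key : A → Nat) (l : List A) (m n : A)
    (h : PySem.List.min? l key = some n) (hlt : key n < key m) :
    pvMinAux key m l = some n := by
  cases l with
  | nil => simp [PySem.List.min?] at h
  | cons x t =>
    rw [min?_cons] at h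
    rw [pvMinAux_cons]
    by_cases hx : key x < key m
    · rw [if_pos hx]; exact h
    · rw [if_neg hx]
      by_cases hnx : key n < key x
      · exact pvMinAux_lt key t x n h hnx m hlt
      · -- then n = x kept all along? derive: pvMinAux key x t = some n with ¬ key n < key x
        -- use pvMinAux_lt only when strict; here compare via m: key n < key m ≤ key x
        have : key n < key x := by omega
        exact pvMinAux_lt key t x n h this m hlt

-- comparisons-preserving key change, restricted to elements satisfying P
theorem pvMinAux_congr {A : Type} (key key' : A → Nat) (P : A → Prop)
    (hcmp : ∀ a b : A, P a → P b → (key' a < key' b ↔ key a < key b)) (l : List A) :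
    ∀ m : A, P m → (∀ y ∈ l, P y) → pvMinAux key' m l = pvMinAux key m l := by
  induction l with
  | nil => intro m _ _; rfl
  | cons x t ih =>
    intro m hm hl
    have hx : P x := hl x (by simp)
    have ht : ∀ y ∈ t, P y := fun y hy => hl y (by simp [hy])
    rw [pvMinAux_cons, pvMinAux_cons]
    by_cases h : key x < key m
    · rw [if_pos h, if_pos ((hcmp x m hx hm).mpr h)]; exact ih x hx ht
    · rw [if_neg h, if_neg (fun hc => h ((hcmp x m hx hm).mp hc))]; exact ih m hm ht

-- the head of the stable insertion sort is the FIRST minimal element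
theorem head?_insertBy {A : Type} (key : A → Nat) (x : A) (acc : List A) :
    (PySem.List.insertBy (fun a b => decide (key a < key b)) x acc).head? =
      (match acc.head? with
       | none => some x
       | some m => if key x < key m then some x else some m) := by
  cases acc with
  | nil => simp [PySem.List.insertBy]
  | cons y ys =>
    simp only [PySem.List.insertBy, List.head?_cons]
    split <;> simp_all

theorem head?_foldl_insertBy {A : Type} (key : A → Nat) (l : List A) :
    ∀ acc : List A,
      (l.foldl (fun acc x => PySem.List.insertBy (fun a b => decide (key a < key b)) x acc) acc).head? =
        l.foldl (fun acc x => match acc with | none => some x | some m => if key x < key m then some x else some m) acc.head? := by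
  induction l with
  | nil => intro acc; rfl
  | cons x t ih =>
    intro acc
    simp only [List.foldl]
    rw [ih, head?_insertBy]

theorem head?_sorted {A : Type} (key : A → Nat) (l : List A) :
    (PySem.List.sorted l key).head? = PySem.List.min? l key := by
  rw [PySem.List.sorted_eq_foldl_insertBy]
  exact head?_foldl_insertBy key l []

-- first minimum of the filtered list, when the priority format has a match
theorem min?_of_find? {A : Type} (p q : A → Bool) (key : A → Nat)
    (hkey : ∀ r : A, p r = true → (key r = 0 ↔ q r = true))
    (hpq : ∀ r : A, q r = true → p r = true) :
    ∀ (l : List A) (r0 : A), l.find? q = some r0 →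
      PySem.List.min? (l.filter p) key = some r0 := by
  intro l
  induction l with
  | nil => intro r0 h; simp at h
  | cons x t ih =>
    intro r0 h
    cases hq : q x with
    | true =>
      rw [List.find?_cons_of_pos hq] at h
      cases h
      rw [List.filter_cons, if_pos (hpq x hq), min?_cons]
      have hx0 : key x = 0 := (hkey x (hpq x hq)).mpr hq
      apply pvMinAux_keep
      intro y _
      omega
    | false =>
      rw [List.find?_cons_of_neg (by simp [hq])] at h
      have hr0q : q r0 = true := List.find?_some h
      have hr0key : key r0 = 0 := (hkey r0 (hpq r0 hr0q)).mpr hr0q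
      rw [List.filter_cons]
      by_cases hp : p x = true
      · rw [if_pos hp, min?_cons]
        have hxkey : key x ≠ 0 := fun h0 => by rw [(hkey x hp).mp h0] at hq; cases hq
        exact pvMinAux_improve key (t.filter p) x r0 (ih r0 h) (by omega)
      · simp only [hp, Bool.false_eq_true, if_false]
        exact ih r0 h

-- MAIN: first minimum by acceptable_formats.index over the filtered list = the priority nested scan
theorem min?_filter_eq_pvScan (rsAll : List (List (String × String))) :
    ∀ af : List String,
      PySem.List.min? (rsAll.filter (fun r => af.contains (pvLowFmt r)))
        (fun r => ((PySem.List.index? af (pvLowFmt r)).getD 0 : Nat)) = pvScan rsAll af := by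
  intro af
  induction af with
  | nil => simp [pvScan, PySem.List.min?]
  | cons f rest ih =>
    rw [pvScan]
    cases hfind : rsAll.find? (fun r => pvLowFmt r == f) with
    | some r0 =>
      apply min?_of_find? _ _ _ _ _ rsAll r0 hfind
      · intro r hp
        constructor
        · intro h0
          by_cases hf : pvLowFmt r = f
          · simp [hf]
          · exfalso
            rw [PySem.List.index?_cons_of_ne rest (Ne.symm hf)] at h0
            simp only [List.contains_cons] at hp
            have hmem : pvLowFmt r ∈ rest := by
              have h' : pvLowFmt r ∈ f :: rest := by simpa using hp
              rcases List.mem_cons.mp h' with h1 | h1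
              · exact absurd h1 hf
              · exact h1
            rcases (PySem.List.index?_isSome_iff rest (pvLowFmt r)).mpr hmem |> Option.isSome_iff_exists.mp with ⟨k, hk⟩
            rw [hk] at h0
            simp at h0
        · intro hq
          have hf : pvLowFmt r = f := by simpa using hq
          rw [hf, PySem.List.index?_cons_self]
          rfl
      · intro r hq
        have hf : pvLowFmt r = f := by simpa using hq
        simp [hf]
    | none =>
      have hnone : ∀ r ∈ rsAll, pvLowFmt r ≠ f := by
        intro r hr
        have := List.find?_eq_none.mp hfind r hr
        simpa using this
      rw [← ih]
      have hfilter : rsAll.filter (fun r => (f :: rest).contains (pvLowFmt r)) =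
          rsAll.filter (fun r => rest.contains (pvLowFmt r)) := by
        apply List.filter_congr
        intro r hr
        simp [hnone r hr]
      rw [hfilter]
      cases hl : rsAll.filter (fun r => rest.contains (pvLowFmt r)) with
      | nil => rfl
      | cons x t =>
        rw [min?_cons, min?_cons]
        have hmem : ∀ y ∈ x :: t, y ∈ rsAll ∧ pvLowFmt y ∈ rest := by
          intro y hy
          have hyf : y ∈ rsAll.filter (fun r => rest.contains (pvLowFmt r)) := hl ▸ hy
          have := List.mem_filter.mp hyf
          exact ⟨this.1, by simpa using this.2⟩
        apply pvMinAux_congr _ _ (fun r => r ∈ rsAll ∧ pvLowFmt r ∈ rest)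
        · intro a b ha hb
          obtain ⟨k1, hk1⟩ := Option.isSome_iff_exists.mp
            ((PySem.List.index?_isSome_iff rest (pvLowFmt a)).mpr ha.2)
          obtain ⟨k2, hk2⟩ := Option.isSome_iff_exists.mp
            ((PySem.List.index?_isSome_iff rest (pvLowFmt b)).mpr hb.2)
          rw [PySem.List.index?_cons_of_ne rest (Ne.symm (hnone a ha.1)),
              PySem.List.index?_cons_of_ne rest (Ne.symm (hnone b hb.1)), hk1, hk2]
          simp only [Option.map_some, Option.getD_some]
          omega
        · exact hmem x (by simp)
        · intro y hy; exact hmem y (by simp [hy])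

-- head of a filter is find?
theorem head?_filter {A : Type} (p : A → Bool) (l : List A) :
    (l.filter p).head? = l.find? p := by
  induction l with
  | nil => rfl
  | cons x t ih =>
    rw [List.filter_cons, List.find?_cons]
    by_cases h : p x = true
    · simp [h]
    · simp [h, ih]

-- ===== VERDICT (by name: the statement is the Claim_ definition above) =====
theorem get_best_resource_spec : Claim_equal_get_best_resource := by
  intro package af uf _ _
  unfold Spec_get_best_resource get_best_resource get_best_resource_alt
  simp only []
  have hkey := min?_filter_eq_pvScan (pvResources package) af
  cases hscan : pvScan (pvResources package) af with
  | some r =>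
    rw [hscan] at hkey
    have hne : (pvResources package).filter (fun r => af.contains (pvLowFmt r)) ≠ [] := by
      intro h
      rw [h] at hkey
      simp [PySem.List.min?] at hkey
    rw [if_neg (by simpa using fun h => hne (List.eq_nil_of_length_eq_zero h))]
    have hhead := head?_sorted (fun r => ((PySem.List.index? af (pvLowFmt r)).getD 0 : Nat))
      ((pvResources package).filter (fun r => af.contains (pvLowFmt r)))
    rw [hkey] at hhead
    cases hs : PySem.List.sorted ((pvResources package).filter (fun r => af.contains (pvLowFmt r)))
        (fun r => ((PySem.List.index? af (pvLowFmt r)).getD 0 : Nat)) with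
    | nil => rw [hs] at hhead; simp at hhead
    | cons a t =>
      rw [hs] at hhead
      simp only [List.head?_cons, Option.some.injEq] at hhead
      simp [PySem.List.pyGet?, PySem.List.pyIdx?, hhead]
  | none =>
    rw [hscan] at hkey
    have hnil : (pvResources package).filter (fun r => af.contains (pvLowFmt r)) = [] :=
      (PySem.List.min?_eq_none_iff _ _).mp hkey
    rw [hnil]
    simp only [List.length_nil, if_pos]
    cases uf with
    | none => simp
    | some l =>
      cases hl : l.isEmpty with
      | true => simp [hl]
      | false =>
        simp only [hl, Bool.not_false, if_pos, Option.getD_some, List.contains_eq_mem]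
        have hf := head?_filter (fun r => !decide (pvLowFmt r ∈ l)) (pvResources package)
        cases hfind : (pvResources package).find? (fun r => !decide (pvLowFmt r ∈ l)) with
        | none =>
          rw [hfind] at hf
          have hmt : (pvResources package).filter (fun r => !decide (pvLowFmt r ∈ l)) = [] := by
            cases h : (pvResources package).filter (fun r => !decide (pvLowFmt r ∈ l)) with
            | nil => rfl
            | cons a t => rw [h] at hf; simp at hf
          rw [hmt]
          simp
        | some r =>
          rw [hfind] at hf
          have hne2 : (pvResources package).filter (fun r => !decide (pvLowFmt r ∈ l)) ≠ [] := by
            intro h; rw [h] at hf; simp at hf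
          rw [if_neg (by simpa using fun h => hne2 (List.eq_nil_of_length_eq_zero h))]
          cases h2 : (pvResources package).filter (fun r => !decide (pvLowFmt r ∈ l)) with
          | nil => exact absurd h2 hne2
          | cons a t =>
            rw [h2] at hf
            simp only [List.head?_cons, Option.some.injEq] at hf
            simp [PySem.List.pyGet?, PySem.List.pyIdx?, hf]
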